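-- pv_equiv track=rewrite | github.com/DrMartinCerny/emg-signalomics | src/emg_signalomics/load/cadwell/cascade.py | _infer_units
-- ===== SOURCE A (Python) =====
-- from typing import Any, Dict, List, Optional, Sequence, Union
--
-- def _infer_units(
--     channel_meta: Dict[str, Dict[str, Any]], channels: List[str]
-- ) -> str:
--     units_set = set()
--     for ch in channels:
--         u = channel_meta[ch].get("Units", None)
--         if u is not None and str(u).strip():
--             units_set.add(str(u).strip())
--     if len(units_set) == 1:
--         return units_set.pop()
--     if len(units_set) > 1:
--         return "mixed"
--     return "unknown"
-- ===== SOURCE B (Python) =====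
-- def _infer_units(channel_meta, channels):
--     common = None
--     for ch in channels:
--         u = channel_meta[ch].get("Units", None)
--         if u is not None:
--             s = str(u).strip()
--             if s:
--                 if common is None:
--                     common = s
--                 elif s != common:
--                     return "mixed"
--     return "unknown" if common is None else common
-- ===== Notes on version B (the rewrite author's own statement) =====
-- stated objective: alternative
-- what changed: Instead of collecting all distinct unit strings into a set and counting them afterwards, B keeps a single candidate string and returns 'mixed' immediately on the first unit that differs from it, never materialising a collection.
import Mathlib
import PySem

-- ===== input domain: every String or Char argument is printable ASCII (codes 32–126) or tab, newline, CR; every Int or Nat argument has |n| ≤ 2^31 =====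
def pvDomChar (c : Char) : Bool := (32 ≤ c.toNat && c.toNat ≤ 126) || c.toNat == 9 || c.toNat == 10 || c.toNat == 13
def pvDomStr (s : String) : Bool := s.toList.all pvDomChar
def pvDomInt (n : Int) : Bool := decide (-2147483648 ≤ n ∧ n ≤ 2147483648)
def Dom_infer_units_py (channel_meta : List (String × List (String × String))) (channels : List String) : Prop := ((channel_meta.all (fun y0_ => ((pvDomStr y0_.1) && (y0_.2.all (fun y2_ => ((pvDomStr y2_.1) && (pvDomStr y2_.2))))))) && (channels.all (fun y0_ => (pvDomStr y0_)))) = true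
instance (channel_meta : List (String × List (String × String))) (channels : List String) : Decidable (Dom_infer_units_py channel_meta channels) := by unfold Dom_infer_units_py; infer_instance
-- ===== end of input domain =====

-- B replaces A's set-of-units accumulation with a single running candidate that
-- returns "mixed" as soon as a second distinct unit appears (alternative decomposition).


-- ===== PORT A =====
-- one loop iteration of A: look up the channel's dict (Pre_ guarantees the key exists),
-- get "Units", add the stripped non-empty value to the set
def pvAStep (channel_meta : List (String × List (String × String))) (s : PySem.Set String) (ch : String) : PySem.Set String :=
  match PySem.Dict.get? ⟨((PySem.Dict.get? ⟨channel_meta⟩ ch).getD [])⟩ "Units" with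
  | none => s
  | some u => if PySem.Str.strip u = "" then s else PySem.Set.add s (PySem.Str.strip u)

-- A's final length tests; `units_set.pop()` on a singleton set is its unique element,
-- so `headD ""` is exact there (the branch is only taken when length = 1)
def pvAFinish (s : PySem.Set String) : String :=
  if s.length = 1 then s.headD ""
  else if s.length > 1 then "mixed"
  else "unknown"

def infer_units_py (channel_meta : List (String × List (String × String))) (channels : List String) : String :=
  pvAFinish (channels.foldl (pvAStep channel_meta) PySem.Set.empty)

-- ===== PORT B =====
def pvAltLoop (channel_meta : List (String × List (String × String))) : List String → Option String → String
  | [], none => "unknown"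
  | [], some c => c
  | ch :: rest, common =>
    match PySem.Dict.get? ⟨((PySem.Dict.get? ⟨channel_meta⟩ ch).getD [])⟩ "Units" with
    | none => pvAltLoop channel_meta rest common
    | some u =>
      let s := PySem.Str.strip u
      if s = "" then pvAltLoop channel_meta rest common
      else
        match common with
        | none => pvAltLoop channel_meta rest (some s)
        | some c => if s = c then pvAltLoop channel_meta rest (some c) else "mixed"

def infer_units_py_alt (channel_meta : List (String × List (String × String))) (channels : List String) : String :=
  pvAltLoop channel_meta channels none

-- ===== PRECONDITION & SPEC =====
-- Pre_ excludes exactly the inputs where Python's `channel_meta[ch]` raises KeyError: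
-- every requested channel must be a key of channel_meta.
def Pre_infer_units_py (channel_meta : List (String × List (String × String))) (channels : List String) : Prop :=
  (channels.all (fun ch => (PySem.Dict.get? ⟨channel_meta⟩ ch).isSome)) = true
instance (channel_meta : List (String × List (String × String))) (channels : List String) : Decidable (Pre_infer_units_py channel_meta channels) := by unfold Pre_infer_units_py; infer_instance

def pvWitness_infer_units_py : (List (String × List (String × String))) × List String :=
  ([("a", [("Units", " mV ")]), ("b", [("Units", "mV")])], ["a", "b"])

def Spec_infer_units_py (channel_meta : List (String × List (String × String))) (channels : List String) (out : String) : Prop := out = infer_units_py_alt channel_meta channels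
instance (channel_meta : List (String × List (String × String))) (channels : List String) (out : String) : Decidable (Spec_infer_units_py channel_meta channels out) := by unfold Spec_infer_units_py; infer_instance

-- ===== CLAIM (what is proved, stated in full; the proofs are below) =====
def Claim_equal_infer_units_py : Prop := ∀ (channel_meta : List (String × List (String × String))) (channels : List String), Dom_infer_units_py channel_meta channels → Pre_infer_units_py channel_meta channels → Spec_infer_units_py channel_meta channels (infer_units_py channel_meta channels)

-- ===== LEMMAS AND PROOFS =====

theorem le_length_set_add (s : PySem.Set String) (x : String) :
    s.length ≤ (PySem.Set.add s x).length := by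
  simp only [PySem.Set.add]
  split <;> simp

theorem le_length_aStep (cm : List (String × List (String × String)))
    (s : PySem.Set String) (ch : String) : s.length ≤ (pvAStep cm s ch).length := by
  unfold pvAStep
  split
  · exact le_rfl
  · split
    · exact le_rfl
    · exact le_length_set_add _ _

-- once A's set has two elements, the answer is "mixed" whatever else is added
theorem aFinish_mixed (cm : List (String × List (String × String))) :
    ∀ (chs : List String) (s : PySem.Set String), 2 ≤ s.length →
      pvAFinish (chs.foldl (pvAStep cm) s) = "mixed" := by
  intro chs
  induction chs with
  | nil => intro s hs; unfold pvAFinish; simp only [List.foldl_nil]; split_ifs <;> first | rfl | omega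
  | cons ch rest ih =>
      intro s hs
      simp only [List.foldl_cons]
      exact ih _ (le_trans hs (le_length_aStep cm s ch))

-- loop invariant: A's set-so-far is exactly B's candidate (empty ↔ none, singleton ↔ some)
theorem loop_agree (cm : List (String × List (String × String))) :
    ∀ (chs : List String) (common : Option String),
      pvAFinish (chs.foldl (pvAStep cm) (match common with | none => [] | some c => [c]))
        = pvAltLoop cm chs common := by
  intro chs
  induction chs with
  | nil =>
      intro common
      cases common <;> simp [pvAltLoop, pvAFinish]
  | cons ch rest ih =>
      intro common
      simp only [List.foldl_cons, pvAltLoop]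
      cases hget : PySem.Dict.get? ⟨((PySem.Dict.get? ⟨cm⟩ ch).getD [])⟩ "Units" with
      | none =>
          have hstep : pvAStep cm (match common with | none => [] | some c => [c]) ch
              = (match common with | none => [] | some c => [c]) := by
            unfold pvAStep; rw [hget]
          rw [hstep]; exact ih common
      | some u =>
          by_cases hstrip : PySem.Str.strip u = ""
          · have hstep : pvAStep cm (match common with | none => [] | some c => [c]) ch
                = (match common with | none => [] | some c => [c]) := by
              unfold pvAStep; rw [hget]; simp [hstrip]
            rw [hstep]
            simp only [hstrip, if_pos]
            exact ih common
          · simp only [if_neg hstrip]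
            cases common with
            | none =>
                have hstep : pvAStep cm [] ch = [PySem.Str.strip u] := by
                  unfold pvAStep; rw [hget]
                  simp [hstrip, PySem.Set.add, PySem.Set.contains]
                rw [hstep]
                exact ih (some (PySem.Str.strip u))
            | some c =>
                by_cases heq : PySem.Str.strip u = c
                · have hstep : pvAStep cm [c] ch = [c] := by
                    unfold pvAStep; rw [hget]
                    simp [PySem.Set.add, PySem.Set.contains, heq]
                  rw [hstep]
                  simp only [if_pos heq]
                  exact ih (some c)
                · have hstep : pvAStep cm [c] ch = [c, PySem.Str.strip u] := by
                    unfold pvAStep; rw [hget]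
                    simp [hstrip, PySem.Set.add, PySem.Set.contains, heq]
                  rw [hstep]
                  simp only [if_neg heq]
                  exact aFinish_mixed cm rest [c, PySem.Str.strip u] (by simp)

-- ===== VERDICT (by name: the statement is the Claim_ definition above) =====
theorem infer_units_py_spec : Claim_equal_infer_units_py := by
  intro cm chs _ _
  unfold Spec_infer_units_py infer_units_py infer_units_py_alt
  exact loop_agree cm chs none
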